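-- pv_equiv track=rewrite | github.com/CodyAdam/aoc-2025 | 2.2.py | is_invalid_divided_by
-- ===== SOURCE A (Python) =====
-- def is_invalid_divided_by(x, divider):
--     s = str(x)
--     if len(s) % divider != 0:
--         return False
--
--     parts = set()
--     part_len = len(s) // divider
--
--     for i in range(divider):
--         parts.add(s[i * part_len : i * part_len + part_len])
--
--     return len(parts) == 1
-- ===== SOURCE B (Python) =====
-- def is_invalid_divided_by(x, divider):
--     s = str(x)
--     if len(s) % divider != 0:
--         return False
--     part_len = len(s) // divider
--     return s == s[:part_len] * divider
-- ===== Notes on version B (the rewrite author's own statement) =====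
-- stated objective: simpler
-- what changed: Replaces the explicit loop that collects each chunk into a set and tests the set's size with a single closed-form comparison: the string equals its first chunk repeated divider times.
import Mathlib
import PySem

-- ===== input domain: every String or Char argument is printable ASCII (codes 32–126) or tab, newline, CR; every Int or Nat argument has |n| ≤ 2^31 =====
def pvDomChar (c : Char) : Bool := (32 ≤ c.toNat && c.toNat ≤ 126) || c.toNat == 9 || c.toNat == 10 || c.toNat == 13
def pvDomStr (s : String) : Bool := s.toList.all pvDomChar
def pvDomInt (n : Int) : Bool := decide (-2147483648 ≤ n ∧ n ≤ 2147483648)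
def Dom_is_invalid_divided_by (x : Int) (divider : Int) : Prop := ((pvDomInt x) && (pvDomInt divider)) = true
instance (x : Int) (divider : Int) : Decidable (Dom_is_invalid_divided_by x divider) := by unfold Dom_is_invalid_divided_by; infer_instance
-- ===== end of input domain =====

-- B replaces A's chunk-collecting loop + set-cardinality test by a single closed-form check
-- that the string equals its first chunk repeated `divider` times (objective: simpler).


-- ===== PORT A =====
def is_invalid_divided_by (x : Int) (divider : Int) : Bool :=
  let s := PySem.Int.toChars x
  if PySem.Int.mod (PySem.List.len s) divider ≠ 0 then false
  else
    let partLen := PySem.Int.floordiv (PySem.List.len s) divider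
    let parts : PySem.Set (List Char) :=
      (PySem.List.pyRange 0 divider 1).foldl
        (fun acc i => PySem.Set.add acc (PySem.List.slice s (some (i * partLen)) (some (i * partLen + partLen))))
        PySem.Set.empty
    decide (PySem.Set.len parts = 1)

-- ===== PORT B =====
-- 's[:part_len] * divider' : Python string repetition (empty for divider ≤ 0) = flatten of replicate divider.toNat
def is_invalid_divided_by_alt (x : Int) (divider : Int) : Bool :=
  let s := PySem.Int.toChars x
  if PySem.Int.mod (PySem.List.len s) divider ≠ 0 then false
  else
    let partLen := PySem.Int.floordiv (PySem.List.len s) divider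
    decide (s = (List.replicate divider.toNat (PySem.List.slice s none (some partLen))).flatten)

-- ===== PRECONDITION & SPEC =====
-- divider = 0 makes 'len(s) % divider' raise ZeroDivisionError in A (and in B).
def Pre_is_invalid_divided_by (x : Int) (divider : Int) : Prop := divider ≠ 0
instance (x : Int) (divider : Int) : Decidable (Pre_is_invalid_divided_by x divider) := by unfold Pre_is_invalid_divided_by; infer_instance
def pvWitness_is_invalid_divided_by : Int × Int := (1212, 2)

def Spec_is_invalid_divided_by (x : Int) (divider : Int) (out : Bool) : Prop := out = is_invalid_divided_by_alt x divider
instance (x : Int) (divider : Int) (out : Bool) : Decidable (Spec_is_invalid_divided_by x divider out) := by unfold Spec_is_invalid_divided_by; infer_instance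

-- ===== CLAIM (what is proved, stated in full; the proofs are below) =====
def Claim_equal_is_invalid_divided_by : Prop := ∀ (x : Int) (divider : Int), Dom_is_invalid_divided_by x divider → Pre_is_invalid_divided_by x divider → Spec_is_invalid_divided_by x divider (is_invalid_divided_by x divider)

-- ===== LEMMAS AND PROOFS =====
theorem toChars_ne_nil (n : Int) : PySem.Int.toChars n ≠ [] := by
  unfold PySem.Int.toChars
  split
  · simp
  · intro h
    rw [Nat.toDigits_eq_if (by norm_num)] at h
    split at h <;> simp at h

-- splitting s into its d chunks of length k and re-joining gives back s
theorem chunks_flatten (d : Nat) : ∀ (s : List Char) (k : Nat), s.length = d * k →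
    ((List.range d).map (fun j => (s.drop (j*k)).take k)).flatten = s := by
  induction d with
  | zero => intro s k h; simp at h ⊢; exact h
  | succ d ih =>
    intro s k h
    rw [List.range_succ_eq_map]
    simp only [List.map_cons, List.map_map, List.flatten_cons]
    have h2 : (s.drop k).length = d * k := by simp [h]; ring_nf; omega
    have := ih (s.drop k) k h2
    have heq : ((List.range d).map (fun j => (s.drop ((j+1)*k)).take k))
        = (List.range d).map (fun j => ((s.drop k).drop (j*k)).take k) := by
      apply List.map_congr_left; intro j _
      rw [List.drop_drop]
      ring_nf
    simp only [Function.comp_def, Nat.zero_mul, List.drop_zero]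
    calc s.take k ++ ((List.range d).map fun j => (s.drop ((j+1)*k)).take k).flatten
        = s.take k ++ ((List.range d).map fun j => ((s.drop k).drop (j*k)).take k).flatten := by rw [heq]
      _ = s.take k ++ s.drop k := by rw [this]
      _ = s := List.take_append_drop k s

-- the j-th chunk of c repeated d times is c
theorem chunk_of_rep (c : List Char) (k : Nat) (hc : c.length = k) :
    ∀ (j d : Nat), j < d → (((List.replicate d c).flatten).drop (j*k)).take k = c := by
  intro j
  induction j with
  | zero =>
    intro d hd
    obtain ⟨d', rfl⟩ : ∃ d', d = d' + 1 := ⟨d - 1, by omega⟩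
    simp only [List.replicate_succ, List.flatten_cons, Nat.zero_mul, List.drop_zero]
    rw [← hc, List.take_left]
  | succ j ih =>
    intro d hd
    obtain ⟨d', rfl⟩ : ∃ d', d = d' + 1 := ⟨d - 1, by omega⟩
    simp only [List.replicate_succ, List.flatten_cons]
    have : (j+1)*k = c.length + j*k := by rw [hc]; ring
    rw [this, List.drop_length_add_append]
    exact ih d' (by omega)

theorem ofList_replicate_pos (c : List Char) (d : Nat) (hd : 0 < d) :
    PySem.Set.ofList (List.replicate d c) = [c] := by
  induction d with
  | zero => omega
  | succ d ih =>
    rw [List.replicate_succ, PySem.Set.ofList_cons]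
    cases Nat.eq_zero_or_pos d with
    | inl h => subst h; simp [PySem.Set.ofList_nil, PySem.Set.discard]
    | inr h =>
      rw [ih h]
      simp [PySem.Set.discard]

-- the set of the d chunks is a singleton iff all chunks equal the first
theorem set_len_one_iff (d : Nat) (hd : 0 < d) (f : Nat → List Char) :
    (PySem.Set.ofList ((List.range d).map f)).length = 1 ↔ ∀ j < d, f j = f 0 := by
  constructor
  · intro h j hj
    obtain ⟨c, hc⟩ := List.length_eq_one_iff.mp h
    have hmem : ∀ y ∈ (List.range d).map f, y = c := by
      intro y hy
      have : y ∈ PySem.Set.ofList ((List.range d).map f) := (PySem.Set.mem_ofList _ _).mpr hy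
      rw [hc] at this; simpa using this
    have h1 : f j = c := hmem _ (List.mem_map.mpr ⟨j, List.mem_range.mpr hj, rfl⟩)
    have h2 : f 0 = c := hmem _ (List.mem_map.mpr ⟨0, List.mem_range.mpr hd, rfl⟩)
    rw [h1, h2]
  · intro h
    have : (List.range d).map f = List.replicate d (f 0) := by
      apply List.eq_replicate_iff.mpr
      refine ⟨by simp, ?_⟩
      intro y hy
      obtain ⟨j, hj, rfl⟩ := List.mem_map.mp hy
      exact h j (List.mem_range.mp hj)
    rw [this, ofList_replicate_pos _ _ hd]; rfl

theorem main_eq (x divider : Int) (hpre : divider ≠ 0) :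
    is_invalid_divided_by x divider = is_invalid_divided_by_alt x divider := by
  have hne := toChars_ne_nil x
  simp only [is_invalid_divided_by, is_invalid_divided_by_alt]
  generalize hsx : PySem.Int.toChars x = s at hne ⊢
  by_cases hm : PySem.Int.mod (PySem.List.len s) divider = 0
  · rcases lt_or_gt_of_ne hpre with hneg | hpos
    · -- divider < 0: A's range loop is empty (set stays empty), B's repetition is empty
      simp only [hm, ne_eq, not_true_eq_false, if_false]
      have h1 : PySem.List.pyRange 0 divider 1 = [] := by
        rw [PySem.List.pyRange_one]
        have : (divider - 0).toNat = 0 := by omega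
        rw [this]; rfl
      have h2 : divider.toNat = 0 := by omega
      rw [h1, h2]
      simp [PySem.Set.len, PySem.List.len, PySem.Set.empty, hne]
    · -- divider > 0 and divider ∣ len(s)
      obtain ⟨d, rfl⟩ : ∃ d : Nat, divider = (d : Int) := ⟨divider.toNat, by omega⟩
      have hd : 0 < d := by exact_mod_cast hpos
      have hdvd : d ∣ s.length := by
        have := (PySem.Int.mod_eq_zero_iff_dvd (PySem.List.len s) (d : Int)).mp hm
        rw [PySem.List.len_eq] at this
        exact_mod_cast this
      obtain ⟨k, hk⟩ := hdvd
      have hpl : PySem.Int.floordiv (PySem.List.len s) (d : Int) = ((k : Nat) : Int) := by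
        rw [PySem.List.len_eq, PySem.Int.floordiv_natCast]
        congr 1
        rw [hk, Nat.mul_div_cancel_left _ hd]
      simp only [hm, ne_eq, not_true_eq_false, if_false, hpl, Int.toNat_natCast]
      rw [PySem.List.pyRange_one]
      have hdn : ((d : Int) - 0).toNat = d := by omega
      rw [hdn, List.foldl_map, ← PySem.Set.update_map_eq_foldl_add, PySem.Set.update_empty]
      have hmapeq : (List.range d).map (fun j : Nat => PySem.List.slice s (some ((0 + (j:Int)) * (k:Int))) (some ((0 + (j:Int)) * (k:Int) + (k:Int))))
          = (List.range d).map (fun j : Nat => (s.drop (j*k)).take k) := by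
        apply List.map_congr_left
        intro j _
        have e1 : (0 + (j:Int)) * (k:Int) = ((j*k : Nat) : Int) := by push_cast; ring
        rw [e1, PySem.List.slice_natCast_add]
      rw [hmapeq]
      have hkle : (s.take k).length = k := by
        rw [List.length_take]
        have : k ≤ s.length := by rw [hk]; exact Nat.le_mul_of_pos_left _ hd
        omega
      rw [show PySem.Set.len (PySem.Set.ofList ((List.range d).map (fun j : Nat => (s.drop (j*k)).take k))) = ((PySem.Set.ofList ((List.range d).map (fun j : Nat => (s.drop (j*k)).take k))).length : Int) from PySem.List.len_eq _]
      rw [PySem.List.slice_to_natCast]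
      apply decide_eq_decide.mpr
      rw [show ((PySem.Set.ofList ((List.range d).map (fun j : Nat => (s.drop (j*k)).take k))).length : Int) = 1 ↔ (PySem.Set.ofList ((List.range d).map (fun j : Nat => (s.drop (j*k)).take k))).length = 1 by exact_mod_cast Iff.rfl]
      rw [set_len_one_iff d hd]
      simp only [Nat.zero_mul, List.drop_zero]
      constructor
      · intro hall
        have hrep : (List.range d).map (fun j : Nat => (s.drop (j*k)).take k) = List.replicate d (s.take k) := by
          apply List.eq_replicate_iff.mpr
          refine ⟨by simp, ?_⟩
          intro y hy
          obtain ⟨j, hj, rfl⟩ := List.mem_map.mp hy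
          rw [hall j (List.mem_range.mp hj)]
        have := chunks_flatten d s k hk
        rw [hrep] at this
        exact this.symm
      · intro hrep j hj
        conv_lhs => rw [hrep]
        rw [chunk_of_rep (s.take k) k hkle j d hj]
  · rw [PySem.List.len_eq] at hm
    simp [hm]

-- ===== VERDICT (by name: the statement is the Claim_ definition above) =====
theorem is_invalid_divided_by_spec : Claim_equal_is_invalid_divided_by := by
  intro x divider _ hpre
  exact main_eq x divider hpre
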